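-- pv_equiv track=rewrite | github.com/geeky33/cn-codes | bit_byte/bit_byte.py | bit_unstuffing
-- ===== SOURCE A (Python) =====
-- def bit_unstuffing(data):
--     ascii_output = ""
--     bit_buffer = ""
--     one_count = 0
--
--     for ch in data:
--         if ch == '0':
--             if one_count != 5:
--                 bit_buffer += ch
--             one_count = 0
--         else:
--             bit_buffer += ch
--             one_count += 1
--
--         if len(bit_buffer) == 8:
--             ascii_output += chr(int(bit_buffer, 2))
--             bit_buffer = ""
--
--     return ascii_output
-- ===== SOURCE B (Python) =====
-- def bit_unstuffing(data):
--     # Two-pass decomposition: destuff the bit stream first, then assemble bytes.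
--     bits = []
--     one_count = 0
--     for ch in data:
--         if ch == '0':
--             if one_count != 5:
--                 bits.append(ch)
--             one_count = 0
--         else:
--             bits.append(ch)
--             one_count += 1
--     out = []
--     while len(bits) >= 8:
--         out.append(chr(int(''.join(bits[:8]), 2)))
--         bits = bits[8:]
--     return ''.join(out)
-- ===== Notes on version B (the rewrite author's own statement) =====
-- stated objective: alternative
-- what changed: A's single fused loop that flushes each byte inline is split into two stages: a destuffing pass building the raw bit list, then a separate byte-assembly loop consuming 8 bits at a time (the incomplete tail is dropped, as A's buffer is).
-- outside the precondition, e.g. on bit_unstuffing('00000000a'): A returns '\x00', B returns '\x00'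
import Mathlib
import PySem

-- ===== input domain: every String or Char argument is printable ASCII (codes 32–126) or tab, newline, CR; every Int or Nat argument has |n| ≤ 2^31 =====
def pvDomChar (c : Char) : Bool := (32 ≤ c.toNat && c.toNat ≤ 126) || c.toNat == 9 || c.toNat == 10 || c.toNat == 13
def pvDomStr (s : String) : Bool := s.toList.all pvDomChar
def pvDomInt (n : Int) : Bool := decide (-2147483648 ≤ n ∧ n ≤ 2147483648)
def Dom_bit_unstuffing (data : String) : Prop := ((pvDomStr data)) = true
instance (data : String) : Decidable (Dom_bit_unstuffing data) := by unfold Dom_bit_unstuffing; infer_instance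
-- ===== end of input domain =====

-- B splits A's fused decode loop into a destuffing pass plus a separate byte-assembly loop (alternative decomposition, same cost).


-- chr(int(buf, 2)) for an 8-character binary buffer; exact on '0'/'1' strings,
-- which is all Pre_ admits to a completed byte (Python raises ValueError otherwise).
def pvByte (buf : List Char) : Char :=
  Char.ofNat (buf.foldl (fun a c => 2 * a + (if c = '1' then 1 else 0)) 0)

-- ===== PORT A =====
-- A's loop body: state = (ascii_output, bit_buffer, one_count); flushes the buffer inline at length 8.
-- the inline flush `if len(bit_buffer) == 8: ...` at the end of A's loop body
def pvFlush (out : List Char) (bc : List Char × Nat) : List Char × List Char × Nat :=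
  if bc.1.length = 8 then (out ++ [pvByte bc.1], [], bc.2) else (out, bc.1, bc.2)

def pvStepA (st : List Char × List Char × Nat) (ch : Char) : List Char × List Char × Nat :=
  pvFlush st.1
    (if ch = '0' then (if st.2.2 ≠ 5 then st.2.1 ++ [ch] else st.2.1, 0)
     else (st.2.1 ++ [ch], st.2.2 + 1))

def bit_unstuffing (data : String) : String :=
  String.mk (data.toList.foldl pvStepA ([], [], 0)).1

-- ===== PORT B =====
-- first pass: destuffing only; state = (bits, one_count)
def pvStepB (st : List Char × Nat) (ch : Char) : List Char × Nat :=
  if ch = '0' then (if st.2 ≠ 5 then st.1 ++ [ch] else st.1, 0)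
  else (st.1 ++ [ch], st.2 + 1)

-- second pass: the while-loop `while len(bits) >= 8: out.append(chr(int(bits[:8],2))); bits = bits[8:]`
def pvChunks (bits : List Char) (out : List Char) : List Char :=
  if 8 ≤ bits.length then pvChunks (bits.drop 8) (out ++ [pvByte (bits.take 8)]) else out
termination_by bits.length
decreasing_by simp; omega

def bit_unstuffing_alt (data : String) : String :=
  String.mk (pvChunks (data.toList.foldl pvStepB ([], 0)).1 [])

-- ===== PRECONDITION & SPEC =====
-- Pre_ excludes strings of length ≥ 8 containing a character other than '0'/'1': there A treats the
-- stray character as a '1' and raises ValueError as soon as it falls inside a completed byte, which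
-- depends on the stuffing positions (on "00000000a" A still returns "\x00", the stray sitting in the
-- dropped incomplete tail; B returns the same there). Strings shorter than 8 never complete a byte,
-- so A always returns on them and they stay inside Pre_.
def Pre_bit_unstuffing (data : String) : Prop :=
  (data.toList.all fun c => c == '0' || c == '1') = true ∨ data.toList.length < 8
instance (data : String) : Decidable (Pre_bit_unstuffing data) := by
  unfold Pre_bit_unstuffing; infer_instance

def pvWitness_bit_unstuffing : String := "01"

def Spec_bit_unstuffing (data : String) (out : String) : Prop := out = bit_unstuffing_alt data
instance (data : String) (out : String) : Decidable (Spec_bit_unstuffing data out) := by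
  unfold Spec_bit_unstuffing; infer_instance

-- ===== CLAIM (what is proved, stated in full; the proofs are below) =====
def Claim_equal_bit_unstuffing : Prop := ∀ (data : String), Dom_bit_unstuffing data → Pre_bit_unstuffing data → Spec_bit_unstuffing data (bit_unstuffing data)

-- ===== LEMMAS AND PROOFS =====

theorem pvChunks_small (buf out : List Char) (h : buf.length < 8) :
    pvChunks buf out = out := by
  unfold pvChunks; rw [if_neg]; omega

theorem pvChunks_append8 (b s out : List Char) (h : b.length = 8) :
    pvChunks (b ++ s) out = pvChunks s (out ++ [pvByte b]) := by
  rw [pvChunks]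
  have h1 : 8 ≤ (b ++ s).length := by simp [h]
  rw [if_pos h1]
  rw [List.take_left' h, List.drop_left' h]

-- loop invariant: running A's fused loop and B's destuffing loop from related states keeps them
-- related: B's bits are the bytes A already consumed (c) followed by A's current buffer, and pvChunks
-- on c produces exactly A's output so far.
theorem pv_loop_inv (l : List Char) :
    ∀ (out buf : List Char) (cnt : Nat) (c : List Char),
      buf.length < 8 →
      (∀ s acc, pvChunks (c ++ s) acc = pvChunks s (acc ++ out)) →
      ∃ c',
        (l.foldl pvStepB (c ++ buf, cnt)).1 = c' ++ (l.foldl pvStepA (out, buf, cnt)).2.1 ∧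
        (l.foldl pvStepA (out, buf, cnt)).2.1.length < 8 ∧
        (∀ s acc, pvChunks (c' ++ s) acc
            = pvChunks s (acc ++ (l.foldl pvStepA (out, buf, cnt)).1)) := by
  induction l with
  | nil => intro out buf cnt c hlen hP; exact ⟨c, rfl, hlen, hP⟩
  | cons ch l ih =>
    intro out buf cnt c hlen hP
    simp only [List.foldl_cons]
    have hlen1 : (buf ++ [ch]).length = buf.length + 1 := by simp
    by_cases hch : ch = '0'
    · by_cases hcnt : cnt ≠ 5
      · by_cases h8 : (buf ++ [ch]).length = 8
        · have hA : pvStepA (out, buf, cnt) ch = (out ++ [pvByte (buf ++ [ch])], [], 0) := by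
            simp only [pvStepA, if_pos hch, if_pos hcnt, pvFlush, if_pos h8]
          have hB : pvStepB (c ++ buf, cnt) ch = (c ++ (buf ++ [ch]), 0) := by
            simp [pvStepB, hch, hcnt]
          rw [hA, hB, show c ++ (buf ++ [ch]) = (c ++ (buf ++ [ch])) ++ [] by simp]
          exact ih _ _ _ _ (by decide)
            (by intro s acc
                rw [List.append_assoc, hP, pvChunks_append8 _ _ _ h8, List.append_assoc])
        · have hA : pvStepA (out, buf, cnt) ch = (out, buf ++ [ch], 0) := by
            simp only [pvStepA, if_pos hch, if_pos hcnt, pvFlush, if_neg h8]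
          have hB : pvStepB (c ++ buf, cnt) ch = (c ++ (buf ++ [ch]), 0) := by
            simp [pvStepB, hch, hcnt]
          rw [hA, hB]
          exact ih _ _ _ _ (by omega) hP
      · have hA : pvStepA (out, buf, cnt) ch = (out, buf, 0) := by
          simp only [pvStepA, if_pos hch, if_neg hcnt, pvFlush]
          rw [if_neg (by omega)]
        have hB : pvStepB (c ++ buf, cnt) ch = (c ++ buf, 0) := by
          simp [pvStepB, hch, hcnt]
        rw [hA, hB]
        exact ih _ _ _ _ hlen hP
    · by_cases h8 : (buf ++ [ch]).length = 8
      · have hA : pvStepA (out, buf, cnt) ch = (out ++ [pvByte (buf ++ [ch])], [], cnt + 1) := by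
          simp only [pvStepA, if_neg hch, pvFlush, if_pos h8]
        have hB : pvStepB (c ++ buf, cnt) ch = (c ++ (buf ++ [ch]), cnt + 1) := by
          simp [pvStepB, hch]
        rw [hA, hB, show c ++ (buf ++ [ch]) = (c ++ (buf ++ [ch])) ++ [] by simp]
        exact ih _ _ _ _ (by decide)
          (by intro s acc
              rw [List.append_assoc, hP, pvChunks_append8 _ _ _ h8, List.append_assoc])
      · have hA : pvStepA (out, buf, cnt) ch = (out, buf ++ [ch], cnt + 1) := by
          simp only [pvStepA, if_neg hch, pvFlush, if_neg h8]
        have hB : pvStepB (c ++ buf, cnt) ch = (c ++ (buf ++ [ch]), cnt + 1) := by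
          simp [pvStepB, hch]
        rw [hA, hB]
        exact ih _ _ _ _ (by omega) hP

-- ===== VERDICT (by name: the statement is the Claim_ definition above) =====
theorem bit_unstuffing_spec : Claim_equal_bit_unstuffing := by
  intro data _ _
  unfold Spec_bit_unstuffing bit_unstuffing bit_unstuffing_alt
  obtain ⟨c', hbits, hlen, hP⟩ :=
    pv_loop_inv data.toList [] [] 0 [] (by simp)
      (by intro s acc; simp)
  have : ([] : List Char) ++ ([] : List Char) = [] := rfl
  rw [this] at hbits
  rw [hbits, hP, List.nil_append,
    pvChunks_small _ _ hlen]
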